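-- pv_equiv track=rewrite | github.com/Amano-take/Atcoder | algorithm/binary tree/funSegTree.py | _get_overhead_indices
-- ===== SOURCE A (Python) =====
-- def _get_overhead_indices(l, r):
--     """ l, r are already added offset """
--     result = []
--     #kisuu ni naru made agatteiku kisuu no sono ikkoue wo sasu
--     l0 = (l // (l & -l)) >> 1
--     r0 = (r // (r & -r)) >> 1
--     while l0 != r0:
--         if l0 > r0:
--             result.append(l0)
--             l0 >>= 1
--         else:
--             result.append(r0)
--             r0 >>= 1
--     while l0:
--         result.append(l0)
--         l0 >>= 1
--     return result
-- ===== SOURCE B (Python) =====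
-- def _get_overhead_indices(l, r):
--     """ l, r are already added offset """
--     seen = set()
--     for x in ((l // (l & -l)) >> 1, (r // (r & -r)) >> 1):
--         while x:
--             seen.add(x)
--             x >>= 1
--     return sorted(seen, reverse=True)
-- ===== Notes on version B (the rewrite author's own statement) =====
-- stated objective: simpler
-- what changed: replaces the stateful two-pointer max-merge of the two ancestor chains by walking each chain independently into a set and returning it sorted in descending order (correct because the chains only converge, so the merge is exactly the descending union)
import Mathlib
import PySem

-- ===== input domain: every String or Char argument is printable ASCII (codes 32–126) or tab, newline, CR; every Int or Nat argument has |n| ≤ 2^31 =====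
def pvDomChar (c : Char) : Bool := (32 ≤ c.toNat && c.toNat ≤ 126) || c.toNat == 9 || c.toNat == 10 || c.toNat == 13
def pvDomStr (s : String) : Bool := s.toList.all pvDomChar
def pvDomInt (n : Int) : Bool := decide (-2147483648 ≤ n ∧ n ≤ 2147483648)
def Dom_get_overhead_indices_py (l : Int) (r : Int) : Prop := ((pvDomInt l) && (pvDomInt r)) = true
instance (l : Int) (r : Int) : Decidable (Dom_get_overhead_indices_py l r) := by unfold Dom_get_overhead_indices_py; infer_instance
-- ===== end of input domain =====

-- B replaces A's stateful two-pointer max-merge of the two root-ward chains by walking each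
-- chain independently into a set and sorting it in descending order (objective: simpler).

-- ===== PORT A =====
-- 'while l0 != r0: …' loop; the fuel 2^100 only makes the recursion total and is never
-- exhausted on Pre_ (at most ~64 iterations there); returns (result, final l0).
def pvALoop1 : Nat → Int → Int → List Int → List Int × Int
  | 0, l0, _, acc => (acc, l0)
  | f+1, l0, r0, acc =>
    if l0 ≠ r0 then
      if l0 > r0 then pvALoop1 f (l0 >>> (1:Nat)) r0 (acc ++ [l0])
      else pvALoop1 f l0 (r0 >>> (1:Nat)) (acc ++ [r0])
    else (acc, l0)

-- 'while l0: …' loop, same fuel convention.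
def pvALoop2 : Nat → Int → List Int → List Int
  | 0, _, acc => acc
  | f+1, x, acc => if x ≠ 0 then pvALoop2 f (x >>> (1:Nat)) (acc ++ [x]) else acc

def get_overhead_indices_py (l : Int) (r : Int) : List Int :=
  let l0 := (PySem.Int.floordiv l (PySem.Int.band l (-l))) >>> (1:Nat)
  let r0 := (PySem.Int.floordiv r (PySem.Int.band r (-r))) >>> (1:Nat)
  let p := pvALoop1 (2^100) l0 r0 []
  pvALoop2 (2^100) p.2 p.1

-- ===== PORT B =====
-- 'while x: seen.add(x); x >>= 1', same fuel convention as A's loops.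
def pvBChain : Nat → Int → PySem.Set Int → PySem.Set Int
  | 0, _, s => s
  | f+1, x, s => if x ≠ 0 then pvBChain f (x >>> (1:Nat)) (PySem.Set.add s x) else s

def get_overhead_indices_py_alt (l : Int) (r : Int) : List Int :=
  let l0 := (PySem.Int.floordiv l (PySem.Int.band l (-l))) >>> (1:Nat)
  let r0 := (PySem.Int.floordiv r (PySem.Int.band r (-r))) >>> (1:Nat)
  PySem.List.sorted (pvBChain (2^100) r0 (pvBChain (2^100) l0 PySem.Set.empty)) (fun x => x) true

-- ===== PRECONDITION & SPEC =====
-- Pre_ excludes exactly the inputs on which the Python A does not return: l = 0 or r = 0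
-- raise ZeroDivisionError in 'l // (l & -l)', and any negative argument makes a loop run forever.
def Pre_get_overhead_indices_py (l : Int) (r : Int) : Prop := 1 ≤ l ∧ 1 ≤ r
instance (l : Int) (r : Int) : Decidable (Pre_get_overhead_indices_py l r) := by unfold Pre_get_overhead_indices_py; infer_instance
def pvWitness_get_overhead_indices_py : Int × Int := (13, 27)
def Spec_get_overhead_indices_py (l : Int) (r : Int) (out : List Int) : Prop := out = get_overhead_indices_py_alt l r
instance (l : Int) (r : Int) (out : List Int) : Decidable (Spec_get_overhead_indices_py l r out) := by unfold Spec_get_overhead_indices_py; infer_instance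

-- ===== CLAIM (what is proved, stated in full; the proofs are below) =====
def Claim_equal_get_overhead_indices_py : Prop := ∀ (l : Int) (r : Int), Dom_get_overhead_indices_py l r → Pre_get_overhead_indices_py l r → Spec_get_overhead_indices_py l r (get_overhead_indices_py l r)

-- ===== LEMMAS AND PROOFS =====

-- Reference value of 'while x: append x; x >>= 1' on a nonnegative start: [x, x/2, …, 1].
def pvChainL (n : Nat) : List Int :=
  if n = 0 then [] else (n : Int) :: pvChainL (n / 2)
  termination_by n
  decreasing_by omega

-- Reference value of A's merge phase followed by its descent phase.
def pvMergeL (a b : Nat) : List Int :=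
  if a = b then pvChainL a
  else if a > b then (a : Int) :: pvMergeL (a / 2) b
  else (b : Int) :: pvMergeL a (b / 2)
  termination_by a + b
  decreasing_by all_goals omega

lemma pvShift_natCast (m : Nat) : ((m : Int) >>> (1:Nat)) = ((m / 2 : Nat) : Int) := by
  show Int.shiftRight _ _ = _
  simp [Int.shiftRight, Nat.shiftRight_one]

lemma pvChainL_cons {n : Nat} (h : n ≠ 0) : pvChainL n = (n : Int) :: pvChainL (n / 2) := by
  rw [pvChainL]; simp [h]

lemma pvChainL_mem (n : Nat) : ∀ y ∈ pvChainL n, 1 ≤ y ∧ y ≤ (n : Int) := by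
  fun_induction pvChainL n with
  | case1 => simp
  | case2 n h ih =>
    intro y hy
    rcases List.mem_cons.1 hy with rfl | hy
    · constructor <;> [omega; exact le_refl _]
    · have h1 := ih y hy
      have h2 : (↑(n/2) : Int) ≤ ↑n := by exact_mod_cast Nat.div_le_self n 2
      exact ⟨h1.1, le_trans h1.2 h2⟩

lemma pvChainL_pairwise (n : Nat) : (pvChainL n).Pairwise (fun a b => b < a) := by
  fun_induction pvChainL n with
  | case1 => simp
  | case2 n h ih =>
    refine List.Pairwise.cons ?_ ih
    intro y hy
    have h2 := (pvChainL_mem _ y hy).2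
    have h3 : (↑(n/2) : Int) < ↑n := by exact_mod_cast (by omega : n/2 < n)
    omega

lemma pvMergeL_mem (a b : Nat) (y : Int) :
    y ∈ pvMergeL a b ↔ y ∈ pvChainL a ∨ y ∈ pvChainL b := by
  fun_induction pvMergeL a b with
  | case1 => tauto
  | case2 a b hne hgt ih =>
    rw [List.mem_cons, ih, pvChainL_cons (by omega : a ≠ 0), List.mem_cons]
    tauto
  | case3 a b hne hgt ih =>
    rw [List.mem_cons, ih, pvChainL_cons (by omega : b ≠ 0), List.mem_cons]
    tauto

lemma pvMergeL_pairwise (a b : Nat) : (pvMergeL a b).Pairwise (fun a b => b < a) := by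
  fun_induction pvMergeL a b with
  | case1 => exact pvChainL_pairwise _
  | case2 a b hne hgt ih =>
    refine List.Pairwise.cons ?_ ih
    intro y hy
    rcases (pvMergeL_mem _ _ y).1 hy with h | h
    · have h1 := (pvChainL_mem _ y h).2
      have : (↑(a/2) : Int) < ↑a := by exact_mod_cast (by omega : a/2 < a)
      omega
    · have h1 := (pvChainL_mem _ y h).2
      have : (↑b : Int) < ↑a := by exact_mod_cast hgt
      omega
  | case3 a b hne hgt ih =>
    refine List.Pairwise.cons ?_ ih
    intro y hy
    rcases (pvMergeL_mem _ _ y).1 hy with h | h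
    · have h1 := (pvChainL_mem _ y h).2
      have : (↑a : Int) < ↑b := by exact_mod_cast (by omega : a < b)
      omega
    · have h1 := (pvChainL_mem _ y h).2
      have : (↑(b/2) : Int) < ↑b := by exact_mod_cast (by omega : b/2 < b)
      omega

lemma pvALoop2_spec (f : Nat) : ∀ (x : Nat) (acc : List Int), x < 2^f →
    pvALoop2 f (x : Int) acc = acc ++ pvChainL x := by
  induction f with
  | zero =>
    intro x acc hx
    have : x = 0 := by omega
    subst this
    rw [pvChainL]; simp [pvALoop2]
  | succ f ih =>
    intro x acc hx
    by_cases h : x = 0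
    · subst h; rw [pvChainL]; simp [pvALoop2]
    · have hcast : ((x : Int)) ≠ 0 := by exact_mod_cast h
      rw [pvALoop2, if_pos hcast, pvShift_natCast, ih _ _ (by rw [pow_succ] at hx; omega),
        pvChainL_cons h]
      simp

lemma pvALoop1_spec (f : Nat) : ∀ (a b : Nat) (acc : List Int), a + b ≤ f → a ≤ 2^31 →
    pvALoop2 (2^100) (pvALoop1 f (a : Int) (b : Int) acc).2 (pvALoop1 f (a : Int) (b : Int) acc).1
      = acc ++ pvMergeL a b := by
  have hbig : ∀ a : Nat, a ≤ 2^31 → a < 2^(2^100) := by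
    intro a ha
    calc a < 2^32 := by omega
    _ ≤ 2^(2^100) := Nat.pow_le_pow_right (by omega) (by norm_num)
  induction f with
  | zero =>
    intro a b acc hf ha
    have : a = 0 := by omega
    have : b = 0 := by omega
    subst_vars
    rw [pvALoop1]
    simp only
    rw [pvALoop2_spec _ 0 acc (hbig 0 (by omega)), pvMergeL]
    simp
  | succ f ih =>
    intro a b acc hf ha
    by_cases hab : a = b
    · subst hab
      rw [pvALoop1, if_neg (by simp)]
      simp only
      rw [pvALoop2_spec _ a acc (hbig a ha), pvMergeL, if_pos rfl]
    · have hne : ((a : Int)) ≠ ((b : Int)) := by exact_mod_cast hab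
      rw [pvALoop1, if_pos hne]
      by_cases hgt : a > b
      · have hgt' : ((a : Int)) > ((b : Int)) := by exact_mod_cast hgt
        rw [if_pos hgt', pvShift_natCast,
          ih (a/2) b (acc ++ [(a : Int)]) (by omega) (by omega)]
        conv_rhs => rw [pvMergeL]
        rw [if_neg hab, if_pos hgt]
        simp
      · have hgt' : ¬ ((a : Int)) > ((b : Int)) := by exact_mod_cast hgt
        rw [if_neg hgt', pvShift_natCast,
          ih a (b/2) (acc ++ [(b : Int)]) (by omega) ha]
        conv_rhs => rw [pvMergeL]
        rw [if_neg hab, if_neg hgt]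
        simp

lemma pvBChain_spec (f : Nat) : ∀ (x : Nat) (s : PySem.Set Int), x < 2^f →
    pvBChain f (x : Int) s = (pvChainL x).foldl PySem.Set.add s := by
  induction f with
  | zero =>
    intro x s hx
    have : x = 0 := by omega
    subst this
    rw [pvChainL]; simp [pvBChain]
  | succ f ih =>
    intro x s hx
    by_cases h : x = 0
    · subst h; rw [pvChainL]; simp [pvBChain]
    · have hcast : ((x : Int)) ≠ 0 := by exact_mod_cast h
      rw [pvBChain, if_pos hcast, pvShift_natCast, ih _ _ (by rw [pow_succ] at hx; omega),
        pvChainL_cons h]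
      simp

lemma pvL0_form (l : Int) (h1 : 1 ≤ l) :
    ∃ a : Nat, (PySem.Int.floordiv l (PySem.Int.band l (-l))) >>> (1:Nat) = (a : Int) ∧ a ≤ l.toNat := by
  set m := l.toNat with hm
  have hl : l = (m : Int) := by omega
  have hm1 : 1 ≤ m := by omega
  have hband : PySem.Int.band l (-l) = ((m - (m &&& (m - 1)) : Nat) : Int) := by
    rw [PySem.Int.band, if_pos (by omega : (0:Int) ≤ l), if_neg (by omega : ¬ (0:Int) ≤ -l)]
    have h2 : (- -l - 1) = l - 1 := by ring
    have h3 : (l - 1).toNat = m - 1 := by omega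
    rw [h2, h3]
  have hlow1 : m &&& (m - 1) ≤ m - 1 := Nat.and_le_right
  refine ⟨m / (m - (m &&& (m - 1))) / 2, ?_, ?_⟩
  · rw [hband, hl, PySem.Int.floordiv_natCast, pvShift_natCast]
  · exact le_trans (Nat.div_le_self _ _) (Nat.div_le_self _ _)

lemma pvMain (a b : Nat) (ha : a ≤ 2^31) (hb : b ≤ 2^31) :
    pvALoop2 (2^100) (pvALoop1 (2^100) (a : Int) (b : Int) []).2 (pvALoop1 (2^100) (a : Int) (b : Int) []).1
      = PySem.List.sorted (pvBChain (2^100) (b : Int) (pvBChain (2^100) (a : Int) PySem.Set.empty)) (fun x => x) true := by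
  have hbig : ∀ a : Nat, a ≤ 2^31 → a < 2^(2^100) := by
    intro a ha
    calc a < 2^32 := by omega
    _ ≤ 2^(2^100) := Nat.pow_le_pow_right (by omega) (by norm_num)
  have hfuel : a + b ≤ 2^100 := by
    calc a + b ≤ 2^31 + 2^31 := by omega
    _ ≤ 2^100 := by norm_num
  rw [pvALoop1_spec _ a b [] hfuel ha, List.nil_append]
  rw [pvBChain_spec _ a PySem.Set.empty (hbig a ha), pvBChain_spec _ b _ (hbig b hb)]
  have hset : (pvChainL b).foldl PySem.Set.add ((pvChainL a).foldl PySem.Set.add PySem.Set.empty)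
      = PySem.Set.ofList (pvChainL a ++ pvChainL b) := by
    rw [PySem.Set.ofList_eq_foldl, List.foldl_append]
    rfl
  rw [hset]
  refine (PySem.List.sorted_rev_eq_of_perm_of_pairwise_gt _ (pvMergeL a b) (fun x => x) ?_ ?_).symm
  · refine (List.perm_ext_iff_of_nodup ?_ (PySem.Set.nodup_ofList _)).2 ?_
    · exact (pvMergeL_pairwise a b).imp (fun h => ne_of_gt h)
    · intro y
      rw [PySem.Set.mem_ofList, List.mem_append, pvMergeL_mem]
  · exact pvMergeL_pairwise a b

-- ===== VERDICT (by name: the statement is the Claim_ definition above) =====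
theorem get_overhead_indices_py_spec : Claim_equal_get_overhead_indices_py := by
  intro l r hdom hpre
  unfold Spec_get_overhead_indices_py get_overhead_indices_py get_overhead_indices_py_alt
  obtain ⟨a, hal, hla⟩ := pvL0_form l hpre.1
  obtain ⟨b, hbl, hrb⟩ := pvL0_form r hpre.2
  have hdl : l.toNat ≤ 2^31 := by
    unfold Dom_get_overhead_indices_py pvDomInt at hdom
    simp only [Bool.and_eq_true, decide_eq_true_eq] at hdom
    omega
  have hdr : r.toNat ≤ 2^31 := by
    unfold Dom_get_overhead_indices_py pvDomInt at hdom
    simp only [Bool.and_eq_true, decide_eq_true_eq] at hdom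
    omega
  simp only [hal, hbl]
  exact pvMain a b (by omega) (by omega)
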